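-- pv_equiv track=rewrite | github.com/FacundoOZ/University-of-Buenos-Aires | MSc-in-Computer-Science/Algoritmos 1/guías/8_Integradora_Python.py | maxima_cantidad_primos
-- ===== SOURCE A (Python) =====
-- def es_primo(n: int) -> bool: # Función auxiliar. Si n es primo, devuelve True
--   res: bool = True
--   if n <= 1:
--     res = False
--   else:
--     for j in range(2,n): # [2,3,4,...,n-1] pues si ninguno divide, 1 y n siempre dividen, y será primo
--       if (n % j) == 0:
--         res = False
--         break
--   return res
--
-- def maxima_cantidad_primos(A: list[list[int]]) -> int:
--   res: int = 0
--   for columna in range(len(A[0])):   # Por cada columna de A,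
--     primos_columna: int = 0          # cuento los primos en dicha columna.
--     for fila in range(len(A)):       # Para cada elemento,
--       if es_primo(A[fila][columna]): # Si el elemento es primo,
--         primos_columna += 1          # sumo uno, sino paso al siguiente
--     if primos_columna > res:         # Si la cantidad de primos de la columna es > res,
--       res = primos_columna           # res será (por ahora) dicho número
--   return res
-- ===== SOURCE B (Python) =====
-- def es_primo(n: int) -> bool:
--   res: bool = True
--   if n <= 1:
--     res = False
--   else:
--     for j in range(2, n):
--       if (n % j) == 0:
--         res = False
--         break
--   return res
--
-- def maxima_cantidad_primos(A: list[list[int]]) -> int: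
--   n = len(A[0])
--   cont = [0] * n
--   for fila in A:
--     for j in range(n):
--       if es_primo(fila[j]):
--         cont[j] += 1
--   return max(cont) if cont else 0
-- ===== Notes on version B (the rewrite author's own statement) =====
-- stated objective: alternative
-- what changed: Replaced the column-outer/row-inner nested scan with a running scalar max by a single row-major pass accumulating per-column prime counts into an array, followed by one final max reduction.
import Mathlib
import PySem

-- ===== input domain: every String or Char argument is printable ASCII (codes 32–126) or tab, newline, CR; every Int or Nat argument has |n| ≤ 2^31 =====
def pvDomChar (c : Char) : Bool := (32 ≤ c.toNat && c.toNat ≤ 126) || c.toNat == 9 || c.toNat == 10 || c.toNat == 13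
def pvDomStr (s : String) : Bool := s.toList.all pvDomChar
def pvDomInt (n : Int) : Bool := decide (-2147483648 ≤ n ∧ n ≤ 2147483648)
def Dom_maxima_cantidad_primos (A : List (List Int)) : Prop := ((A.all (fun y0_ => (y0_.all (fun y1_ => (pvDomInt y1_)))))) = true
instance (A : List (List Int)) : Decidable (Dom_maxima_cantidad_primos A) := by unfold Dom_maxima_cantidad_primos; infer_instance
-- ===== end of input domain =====

-- B replaces A's column-outer/row-inner nested scan + running max by one row-major pass
-- into a per-column counts array followed by a final max reduction (objective: alternative).


-- ===== PORT A =====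
-- shared helper es_primo (identical in Source A and Source B): trial division over range(2, n) with break
def esPrimo (n : Int) : Bool :=
  if n ≤ 1 then false
  else (PySem.List.pyRange 2 n 1).all (fun j => !(PySem.Int.mod n j == 0))

def maxima_cantidad_primos (A : List (List Int)) : Int :=
  (List.range (A.headD []).length).foldl
    (fun res columna =>
      let primos : Int :=
        (List.range A.length).foldl
          (fun p fila => if esPrimo ((A.getD fila []).getD columna 0) then p + 1 else p) 0
      if primos > res then primos else res)
    0

-- ===== PORT B =====
def maxima_cantidad_primos_alt (A : List (List Int)) : Int :=
  let n := (A.headD []).length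
  let cont : List Int := A.foldl
    (fun c fila =>
      (List.range n).foldl
        (fun c j => if esPrimo (fila.getD j 0) then c.set j (c.getD j 0 + 1) else c) c)
    (List.replicate n 0)
  match PySem.List.max? cont (fun x => x) with
  | some m => m
  | none => 0

-- ===== PRECONDITION & SPEC =====
-- Pre_ excludes exactly the inputs where Python A raises IndexError: the empty matrix
-- (A[0]) and ragged matrices with some row shorter than the first row (A[fila][columna]).
def Pre_maxima_cantidad_primos (A : List (List Int)) : Prop :=
  A ≠ [] ∧ ∀ row ∈ A, (A.headD []).length ≤ row.length
instance (A : List (List Int)) : Decidable (Pre_maxima_cantidad_primos A) := by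
  unfold Pre_maxima_cantidad_primos; infer_instance
def pvWitness_maxima_cantidad_primos : List (List Int) := [[2, 3, 4], [5, 8, 9]]

def Spec_maxima_cantidad_primos (A : List (List Int)) (out : Int) : Prop := out = maxima_cantidad_primos_alt A
instance (A : List (List Int)) (out : Int) : Decidable (Spec_maxima_cantidad_primos A out) := by unfold Spec_maxima_cantidad_primos; infer_instance

-- ===== CLAIM (what is proved, stated in full; the proofs are below) =====
def Claim_equal_maxima_cantidad_primos : Prop := ∀ (A : List (List Int)), Dom_maxima_cantidad_primos A → Pre_maxima_cantidad_primos A → Spec_maxima_cantidad_primos A (maxima_cantidad_primos A)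

-- ===== LEMMAS AND PROOFS =====

-- number of rows of A whose j-th entry is prime (the count of column j)
def colCnt (A : List (List Int)) (j : ℕ) : Int :=
  (A.countP (fun row => esPrimo (row.getD j 0)) : Int)

theorem colCnt_nonneg (A : List (List Int)) (j : ℕ) : 0 ≤ colCnt A j := by
  simp [colCnt]

theorem colCnt_cons (r : List Int) (t : List (List Int)) (j : ℕ) :
    colCnt (r :: t) j = (if esPrimo (r.getD j 0) then 1 else 0) + colCnt t j := by
  simp [colCnt, List.countP_cons]
  split_ifs <;> ring

-- fold over range l.length through getD = fold over l
theorem foldl_range_getD {α β : Type} (d : α) (g : β → α → β) :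
    ∀ (l : List α) (init : β),
      (List.range l.length).foldl (fun s i => g s (l.getD i d)) init = l.foldl g init := by
  intro l
  induction l with
  | nil => simp
  | cons x t ih =>
    intro init
    simpa [List.range_succ_eq_map, List.foldl_map] using ih (g init x)

theorem foldl_count (j : ℕ) :
    ∀ (A : List (List Int)) (init : Int),
      A.foldl (fun p row => if esPrimo (row.getD j 0) then p + 1 else p) init
        = init + colCnt A j := by
  intro A
  induction A with
  | nil => simp [colCnt]
  | cons r t ih =>
    intro init
    rw [List.foldl_cons, ih, colCnt_cons]
    split_ifs <;> ring

theorem inner_eq (A : List (List Int)) (j : ℕ) :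
    (List.range A.length).foldl
      (fun p fila => if esPrimo ((A.getD fila []).getD j 0) then p + 1 else p) 0
      = colCnt A j := by
  rw [foldl_range_getD ([] : List Int)
        (fun p row => if esPrimo (row.getD j 0) then p + 1 else p) A 0, foldl_count]
  ring

-- row step of B: length preserved
theorem rowfold_length (fila : List Int) :
    ∀ (n : ℕ) (c : List Int),
      ((List.range n).foldl
        (fun c j => if esPrimo (fila.getD j 0) then c.set j (c.getD j 0 + 1) else c) c).length
        = c.length := by
  intro n
  induction n with
  | zero => simp
  | succ n ih =>
    intro c
    rw [List.range_succ, List.foldl_append, List.foldl_cons, List.foldl_nil]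
    split_ifs
    · rw [List.length_set]; exact ih c
    · exact ih c

-- if with a succ bound, off the top index
theorem ite_lt_succ (j n : ℕ) (b : Bool) (hjn : j ≠ n) :
    (if j < n + 1 ∧ b = true then (1 : Int) else 0) = if j < n ∧ b = true then 1 else 0 := by
  by_cases hb : b = true
  · simp only [hb, and_true]
    split_ifs <;> omega
  · simp [hb]

-- degenerate twin of ite_lt_succ at the top index, when the entry is not prime
theorem ite_self_succ (j : ℕ) (b : Bool) (hb : ¬ b = true) :
    (c : Int) → (c + if j < j ∧ b = true then 1 else 0) = c + if j < j + 1 ∧ b = true then 1 else 0 := by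
  intro c
  simp [hb]

-- row step of B: pointwise effect
theorem rowfold_getD (fila : List Int) :
    ∀ (n : ℕ) (c : List Int) (j : ℕ), j < c.length →
      ((List.range n).foldl
        (fun c j => if esPrimo (fila.getD j 0) then c.set j (c.getD j 0 + 1) else c) c).getD j 0
        = c.getD j 0 + (if j < n ∧ esPrimo (fila.getD j 0) then 1 else 0) := by
  intro n
  induction n with
  | zero =>
    intro c j hj
    simp
  | succ n ih =>
    intro c j hj
    rw [List.range_succ, List.foldl_append, List.foldl_cons, List.foldl_nil]
    by_cases hp : esPrimo (fila.getD n 0)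
    · rw [if_pos hp]
      by_cases hjn : j = n
      · subst hjn
        have hlen : j < ((List.range j).foldl
            (fun c j => if esPrimo (fila.getD j 0) then c.set j (c.getD j 0 + 1) else c) c).length := by
          rw [rowfold_length]; exact hj
        rw [List.getD_eq_getElem _ _ (by simpa using hlen), List.getElem_set_self, ih c j hj]
        simp only [List.getD] at hp
        simp [hp]
      · have hset : ∀ (L : List Int) (v : Int), (L.set n v).getD j 0 = L.getD j 0 := by
          intro L v
          simp [List.getD, List.getElem?_set_ne (Ne.symm hjn)]
        rw [hset, ih c j hj, ite_lt_succ j n _ hjn]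
    · rw [if_neg hp, ih c j hj]
      by_cases hjn : j = n
      · subst hjn; exact ite_self_succ j _ hp _
      · rw [ite_lt_succ j n _ hjn]

-- the full accumulation over all rows
theorem contfold_length (n : ℕ) :
    ∀ (A : List (List Int)) (c : List Int),
      (A.foldl (fun c fila => (List.range n).foldl
          (fun c j => if esPrimo (fila.getD j 0) then c.set j (c.getD j 0 + 1) else c) c) c).length
        = c.length := by
  intro A
  induction A with
  | nil => simp
  | cons r t ih =>
    intro c
    rw [List.foldl_cons, ih, rowfold_length]

theorem contfold_getD (n : ℕ) :
    ∀ (A : List (List Int)) (c : List Int), c.length = n → ∀ j, j < n →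
      (A.foldl (fun c fila => (List.range n).foldl
          (fun c j => if esPrimo (fila.getD j 0) then c.set j (c.getD j 0 + 1) else c) c) c).getD j 0
        = c.getD j 0 + colCnt A j := by
  intro A
  induction A with
  | nil => intro c _ j _; simp [colCnt]
  | cons r t ih =>
    intro c hc j hj
    rw [List.foldl_cons,
        ih _ (by rw [rowfold_length]; exact hc) j hj,
        rowfold_getD r n c j (by omega), colCnt_cons]
    simp only [hj, true_and]
    ring

-- B's counts list is exactly the list of column counts
theorem cont_eq (A : List (List Int)) (n : ℕ) :
    (A.foldl (fun c fila => (List.range n).foldl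
        (fun c j => if esPrimo (fila.getD j 0) then c.set j (c.getD j 0 + 1) else c) c)
      (List.replicate n (0 : Int)))
      = (List.range n).map (colCnt A) := by
  apply List.ext_getElem
  · rw [contfold_length]; simp
  · intro j h1 h2
    have hj : j < n := by simpa using h2
    have hlen : j < (A.foldl (fun c fila => (List.range n).foldl
        (fun c j => if esPrimo (fila.getD j 0) then c.set j (c.getD j 0 + 1) else c) c)
      (List.replicate n (0 : Int))).length := h1
    rw [← List.getD_eq_getElem _ 0 hlen,
        contfold_getD n A (List.replicate n (0 : Int)) (by simp) j hj]
    simp [hj]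

-- A's outer loop is the running max over the column counts
theorem aside_eq (A : List (List Int)) (n : ℕ) :
    (List.range n).foldl
      (fun res columna =>
        let primos : Int :=
          (List.range A.length).foldl
            (fun p fila => if esPrimo ((A.getD fila []).getD columna 0) then p + 1 else p) 0
        if primos > res then primos else res)
      0
      = ((List.range n).map (colCnt A)).foldl max 0 := by
  rw [List.foldl_map]
  apply PySem.List.foldl_congr_mem
  intro b a _
  rw [inner_eq]
  simp only [max_def]
  split_ifs <;> omega

theorem max_core (L : List Int) (hL : ∀ x ∈ L, 0 ≤ x) :
    L.foldl max 0
      = (match PySem.List.max? L (fun x => x) with | some m => m | none => 0) := by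
  cases L with
  | nil => simp [PySem.List.max?]
  | cons x t =>
    rw [PySem.List.max?_id_cons]
    have hx : max 0 x = x := max_eq_right (hL x (by simp))
    simp [hx]

-- ===== VERDICT (by name: the statement is the Claim_ definition above) =====
theorem maxima_cantidad_primos_spec : Claim_equal_maxima_cantidad_primos := by
  intro A _ _
  have hnn : ∀ x ∈ (List.range (A.headD []).length).map (colCnt A), (0 : Int) ≤ x := by
    intro x hx
    rcases List.mem_map.mp hx with ⟨j, _, rfl⟩
    exact colCnt_nonneg A j
  have hB : maxima_cantidad_primos_alt A
      = (match PySem.List.max? ((List.range (A.headD []).length).map (colCnt A)) (fun x => x) with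
         | some m => m | none => 0) := by
    simp only [maxima_cantidad_primos_alt]
    rw [cont_eq]
  have hA : maxima_cantidad_primos A
      = ((List.range (A.headD []).length).map (colCnt A)).foldl max 0 := by
    simp only [maxima_cantidad_primos]
    exact aside_eq A ((A.headD []).length)
  show maxima_cantidad_primos A = maxima_cantidad_primos_alt A
  rw [hA, hB]
  exact max_core _ hnn
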